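-- pv_equiv track=rewrite | github.com/sn2121161/FPS_allocation_algorithm | functions/allocation/alloc_functions/mixed.py | vehicle_fuel_category
-- ===== SOURCE A (Python) =====
-- def vehicle_fuel_category(fuels):
--     fossil_fuel = [fuel in ['diesel', 'petrol'] for fuel in fuels]
--     if all(fossil_fuel):
--         return 'Fossil Fuel'
--     elif any(fossil_fuel):
--         return 'Mixed'
--     else:
--         return 'EV'
-- ===== SOURCE B (Python) =====
-- def vehicle_fuel_category(fuels):
--     seen_fossil = seen_other = False
--     for fuel in fuels:
--         if fuel in ('diesel', 'petrol'):
--             seen_fossil = True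
--         else:
--             seen_other = True
--         if seen_fossil and seen_other:
--             return 'Mixed'
--     return 'EV' if seen_other else 'Fossil Fuel'
-- ===== Notes on version B (the rewrite author's own statement) =====
-- stated objective: alternative
-- what changed: Replaces A's two staged passes (build a boolean list, then fold it with all and then any) by a single pass with two accumulator flags that returns 'Mixed' early as soon as both a fossil and a non-fossil fuel have been seen.
import Mathlib
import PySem

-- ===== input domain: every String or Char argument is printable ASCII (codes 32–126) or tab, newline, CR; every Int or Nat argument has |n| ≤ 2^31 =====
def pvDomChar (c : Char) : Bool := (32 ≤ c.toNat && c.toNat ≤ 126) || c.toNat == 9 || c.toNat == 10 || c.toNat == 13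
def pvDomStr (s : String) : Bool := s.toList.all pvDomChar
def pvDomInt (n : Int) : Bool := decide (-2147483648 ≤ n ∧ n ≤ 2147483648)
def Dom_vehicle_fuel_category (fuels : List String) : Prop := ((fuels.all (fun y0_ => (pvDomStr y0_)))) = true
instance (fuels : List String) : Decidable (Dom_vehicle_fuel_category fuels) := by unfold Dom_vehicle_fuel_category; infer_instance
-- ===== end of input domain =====

-- ===== PORT A =====
-- B replaces A's two staged passes (boolean list + all, then any) by one pass with two
-- flags and an early 'Mixed' return; equivalence of return values only.
def vehicle_fuel_category (fuels : List String) : String :=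
  let fossil_fuel := fuels.map (fun fuel => ["diesel", "petrol"].contains fuel)
  if fossil_fuel.all id then "Fossil Fuel"
  else if fossil_fuel.any id then "Mixed"
  else "EV"

-- ===== PORT B =====
-- the loop of Source B: flags seen_fossil / seen_other, early return on both set
def vfcAltGo : List String → Bool → Bool → String
  | [], _, seen_other => if seen_other then "EV" else "Fossil Fuel"
  | fuel :: rest, seen_fossil, seen_other =>
    let sf := seen_fossil || (fuel == "diesel" || fuel == "petrol")
    let so := seen_other || !(fuel == "diesel" || fuel == "petrol")
    if sf && so then "Mixed" else vfcAltGo rest sf so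

def vehicle_fuel_category_alt (fuels : List String) : String :=
  vfcAltGo fuels false false

-- ===== PRECONDITION & SPEC =====
def Spec_vehicle_fuel_category (fuels : List String) (out : String) : Prop := out = vehicle_fuel_category_alt fuels
instance (fuels : List String) (out : String) : Decidable (Spec_vehicle_fuel_category fuels out) := by unfold Spec_vehicle_fuel_category; infer_instance

-- ===== CLAIM =====
def Claim_equal_vehicle_fuel_category : Prop := ∀ (fuels : List String), Dom_vehicle_fuel_category fuels → Spec_vehicle_fuel_category fuels (vehicle_fuel_category fuels)

-- ===== LEMMAS AND PROOFS =====

-- characterisation of the loop under its invariant (never both flags set on entry):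
-- result in terms of any over the remaining list and the flags
lemma vfcAltGo_eq (fuels : List String) : ∀ (sf so : Bool), (sf && so) = false →
    vfcAltGo fuels sf so =
      (if (sf || fuels.any (fun f => f == "diesel" || f == "petrol"))
          && (so || fuels.any (fun f => !(f == "diesel" || f == "petrol"))) then "Mixed"
       else if so || fuels.any (fun f => !(f == "diesel" || f == "petrol")) then "EV"
       else "Fossil Fuel") := by
  induction fuels with
  | nil =>
      intro sf so h
      cases sf <;> cases so <;> simp_all [vfcAltGo]
  | cons fuel rest ih =>
      intro sf so h
      cases hb : (fuel == "diesel" || fuel == "petrol") <;> cases sf <;> cases so <;>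
        first
        | (exfalso; exact Bool.false_ne_true h.symm)
        | simp only [vfcAltGo, List.any_cons, hb, ih, Bool.not_true, Bool.not_false,
            Bool.true_or, Bool.false_or, Bool.or_true, Bool.or_false, Bool.true_and,
            Bool.false_and, Bool.and_true, Bool.and_false, Bool.and_self,
            Bool.or_self] <;> simp

-- ===== VERDICT =====
theorem vehicle_fuel_category_spec : Claim_equal_vehicle_fuel_category := by
  intro fuels _
  unfold Spec_vehicle_fuel_category vehicle_fuel_category vehicle_fuel_category_alt
  rw [vfcAltGo_eq fuels false false rfl]
  simp only [Bool.false_or, List.all_map, List.any_map, Function.comp_def, id, List.contains_cons,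
    List.contains_nil, Bool.or_comm]
  have hall : (fuels.all (fun f => f == "diesel" || f == "petrol"))
      = !(fuels.any (fun f => !(f == "diesel" || f == "petrol"))) := by
    simp [List.all_eq_not_any_not]
  rw [hall]
  cases ha : (fuels.any (fun f => f == "diesel" || f == "petrol")) <;>
    cases hn : (fuels.any (fun f => !(f == "diesel" || f == "petrol"))) <;>
      simp
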